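-- pv_equiv track=rewrite | github.com/Remy-Rat/GLAMRDiP | Ops/Scripts/daily_digest.py | filter_completed_actions
-- ===== SOURCE A (Python) =====
-- def filter_completed_actions(actions_by_region, completed_by_region):
--     """Drop actions whose text matches any completed-substring for that region.
--
--     Substring match is case-insensitive. Returns a NEW dict — input not mutated.
--     """
--     if not completed_by_region:
--         return actions_by_region
--     out = {}
--     for region, actions in actions_by_region.items():
--         completed_terms = [t.lower() for t in (completed_by_region.get(region) or [])]
--         if not completed_terms or not actions:
--             out[region] = actions
--             continue
--         out[region] = [
--             a for a in actions
--             if not any(term and term in a.lower() for term in completed_terms)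
--         ]
--     return out
-- ===== SOURCE B (Python) =====
-- def _hit(low, buckets):
--     """Scan the lowered action position by position; at each position try only
--     the terms whose first character matches that position's character."""
--     for i in range(len(low)):
--         for t in buckets.get(low[i], ()):
--             if low.startswith(t, i):
--                 return True
--     return False
--
--
-- def filter_completed_actions(actions_by_region, completed_by_region):
--     """Index the completed terms by first character, then scan each action once
--     position by position instead of one substring search per term."""
--     if not completed_by_region:
--         return actions_by_region
--     out = {}
--     for region, actions in actions_by_region.items():
--         buckets = {}
--         for t in completed_by_region.get(region) or []:
--             t = t.lower()
--             if t:
--                 buckets.setdefault(t[0], []).append(t)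
--         out[region] = [a for a in actions if not _hit(a.lower(), buckets)]
--     return out
-- ===== Notes on version B (the rewrite author's own statement) =====
-- stated objective: alternative
-- what changed: B replaces the per-term substring search (term in action.lower() for every term) with a first-character index: the completed terms of a region are bucketed by their first character once, and each lowered action is then scanned position by position, testing startswith only for the terms whose first character matches the character at that position.
import Mathlib
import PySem

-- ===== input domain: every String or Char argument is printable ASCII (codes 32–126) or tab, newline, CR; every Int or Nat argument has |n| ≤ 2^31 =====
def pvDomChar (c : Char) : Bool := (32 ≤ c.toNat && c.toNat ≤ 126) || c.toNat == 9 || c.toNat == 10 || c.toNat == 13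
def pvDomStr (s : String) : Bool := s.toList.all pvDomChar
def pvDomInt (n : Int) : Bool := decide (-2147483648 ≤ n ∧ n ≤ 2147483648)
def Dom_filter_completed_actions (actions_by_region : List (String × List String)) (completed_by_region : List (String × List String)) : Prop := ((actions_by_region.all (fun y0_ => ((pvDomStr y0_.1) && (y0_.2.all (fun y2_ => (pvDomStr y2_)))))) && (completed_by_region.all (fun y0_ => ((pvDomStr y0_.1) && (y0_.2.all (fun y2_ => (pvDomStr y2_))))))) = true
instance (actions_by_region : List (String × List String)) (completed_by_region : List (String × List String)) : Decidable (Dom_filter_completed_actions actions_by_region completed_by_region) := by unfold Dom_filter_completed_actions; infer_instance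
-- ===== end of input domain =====

-- B indexes each region's completed terms by their first character and scans each lowered
-- action once, position by position, instead of one 'term in text' substring search per term
-- (objective: alternative; return value only — neither program mutates its arguments).

-- ===== PORT A =====
def filter_completed_actions (actions_by_region : List (String × List String)) (completed_by_region : List (String × List String)) : List (String × List String) :=
  if completed_by_region.isEmpty then actions_by_region
  else
    (actions_by_region.foldl (fun (out : PySem.Dict String (List String)) ra =>
        let completed_terms := (((PySem.Dict.mk completed_by_region).get? ra.1).getD []).map PySem.Str.lower
        if completed_terms.isEmpty || ra.2.isEmpty then out.insert ra.1 ra.2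
        else out.insert ra.1 (ra.2.filter (fun a =>
          ! completed_terms.any (fun t => !(t == "") && PySem.Str.isIn t (PySem.Str.lower a)))))
      PySem.Dict.empty).items

-- ===== PORT B =====
-- buckets: the region's completed terms, lowered, keyed by their first character
-- (an empty lowered term has no first character and is skipped, as in Source B's 'if t:')
def pvBuckets (terms : List String) : PySem.Dict Char (List (List Char)) :=
  terms.foldl (fun b t =>
    match PySem.Chars.lower t.toList with
    | [] => b
    | c :: cs => b.modify c [] (· ++ [c :: cs])) PySem.Dict.empty

-- _hit: scan the positions left to right (structural recursion over the suffixes of low);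
-- low.startswith(t, i) is PySem.Chars.startswith on the suffix at i — exact on all inputs
def pvHit (buckets : PySem.Dict Char (List (List Char))) : List Char → Bool
  | [] => false
  | c :: rest =>
      (buckets.getD c []).any (fun t => PySem.Chars.startswith (c :: rest) t) || pvHit buckets rest

def filter_completed_actions_alt (actions_by_region : List (String × List String)) (completed_by_region : List (String × List String)) : List (String × List String) :=
  if completed_by_region.isEmpty then actions_by_region
  else
    (actions_by_region.foldl (fun (out : PySem.Dict String (List String)) ra =>
        let buckets := pvBuckets (((PySem.Dict.mk completed_by_region).get? ra.1).getD [])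
        out.insert ra.1 (ra.2.filter (fun a => ! pvHit buckets (PySem.Chars.lower a.toList))))
      PySem.Dict.empty).items

-- ===== PRECONDITION & SPEC =====
def Spec_filter_completed_actions (actions_by_region : List (String × List String)) (completed_by_region : List (String × List String)) (out : List (String × List String)) : Prop := out = filter_completed_actions_alt actions_by_region completed_by_region
instance (actions_by_region : List (String × List String)) (completed_by_region : List (String × List String)) (out : List (String × List String)) : Decidable (Spec_filter_completed_actions actions_by_region completed_by_region out) := by unfold Spec_filter_completed_actions; infer_instance

-- ===== CLAIM =====
def Claim_equal_filter_completed_actions : Prop := ∀ (actions_by_region : List (String × List String)) (completed_by_region : List (String × List String)), Dom_filter_completed_actions actions_by_region completed_by_region → Spec_filter_completed_actions actions_by_region completed_by_region (filter_completed_actions actions_by_region completed_by_region)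

-- ===== LEMMAS AND PROOFS =====

-- the bucket at c holds exactly the nonempty lowered terms starting with c, in order
theorem pv_buckets_getD (ts : List String) (c : Char) :
    (pvBuckets ts).getD c []
      = (ts.map (fun t => PySem.Chars.lower t.toList)).filter (fun tl => tl.head? == some c) := by
  have aux : ∀ d : PySem.Dict Char (List (List Char)),
      (ts.foldl (fun b t =>
        match PySem.Chars.lower t.toList with
        | [] => b
        | c' :: cs => b.modify c' [] (· ++ [c' :: cs])) d).getD c []
      = d.getD c [] ++ (ts.map (fun t => PySem.Chars.lower t.toList)).filter (fun tl => tl.head? == some c) := by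
    induction ts with
    | nil => simp
    | cons t rest ih =>
        intro d
        rw [List.foldl_cons, List.map_cons, List.filter_cons]
        cases h : PySem.Chars.lower t.toList with
        | nil => simp [ih]
        | cons c' cs =>
            rw [ih]
            by_cases hc : c = c'
            · subst hc
              simp [PySem.Dict.getD_modify_self]
            · rw [PySem.Dict.getD_modify_of_ne _ _ _ hc]
              simp [Ne.symm hc]
  simpa using aux PySem.Dict.empty

-- the position scan finds exactly the nonempty lowered terms occurring as an infix
theorem pv_hit_iff (ts : List String) (s : List Char) :
    pvHit (pvBuckets ts) s = true
      ↔ ∃ tl ∈ ts.map (fun t => PySem.Chars.lower t.toList), tl ≠ [] ∧ tl <:+: s := by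
  induction s with
  | nil =>
      simp only [pvHit, Bool.false_eq_true, false_iff]
      rintro ⟨tl, _, hne, hinf⟩
      exact hne (List.eq_nil_of_infix_nil hinf)
  | cons c rest ih =>
      simp only [pvHit, Bool.or_eq_true, List.any_eq_true, ih, pv_buckets_getD,
        List.mem_filter, PySem.Chars.startswith_iff, beq_iff_eq]
      constructor
      · rintro (⟨tl, ⟨hm, hh⟩, hp⟩ | ⟨tl, hm, hne, hinf⟩)
        · exact ⟨tl, hm, by rintro rfl; simp at hh, List.infix_cons_iff.mpr (Or.inl hp)⟩
        · exact ⟨tl, hm, hne, List.infix_cons_iff.mpr (Or.inr hinf)⟩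
      · rintro ⟨tl, hm, hne, hinf⟩
        rcases List.infix_cons_iff.mp hinf with hp | hi
        · left
          refine ⟨tl, ⟨hm, ?_⟩, hp⟩
          cases tl with
          | nil => exact absurd rfl hne
          | cons x xs =>
              obtain ⟨u, hu⟩ := hp
              simp only [List.cons_append] at hu
              simp [(List.cons_eq_cons.mp hu).1]
        · exact Or.inr ⟨tl, hm, hne, hi⟩

-- per action: B's scan-miss is A's 'no nonempty term is a substring'
theorem pv_pred_eq (ts : List String) (a : String) :
    (! pvHit (pvBuckets ts) (PySem.Chars.lower a.toList))
      = (! (ts.map PySem.Str.lower).any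
          (fun t => !(t == "") && PySem.Str.isIn t (PySem.Str.lower a))) := by
  congr 1
  rw [Bool.eq_iff_iff, pv_hit_iff, List.any_eq_true]
  constructor
  · rintro ⟨tl, hm, hne, hinf⟩
    rcases List.mem_map.mp hm with ⟨u, hu, rfl⟩
    refine ⟨PySem.Str.lower u, List.mem_map_of_mem hu, ?_⟩
    simp only [Bool.and_eq_true, Bool.not_eq_true', beq_eq_false_iff_ne]
    refine ⟨?_, (PySem.Str.isIn_iff_infix _ _).mpr ?_⟩
    · intro h
      exact hne (by simpa [String.toList_eq_nil_iff, PySem.Str.toList_lower] using congrArg String.toList h)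
    · simpa [PySem.Str.toList_lower] using hinf
  · rintro ⟨t, hm, hcond⟩
    rcases List.mem_map.mp hm with ⟨u, hu, rfl⟩
    simp only [Bool.and_eq_true, Bool.not_eq_true', beq_eq_false_iff_ne] at hcond
    obtain ⟨hne, hin⟩ := hcond
    refine ⟨PySem.Chars.lower u.toList, List.mem_map_of_mem hu, ?_, ?_⟩
    · intro h
      exact hne (String.toList_eq_nil_iff.mp (by rw [PySem.Str.toList_lower]; exact h))
    · have := (PySem.Str.isIn_iff_infix _ _).mp hin
      simpa [PySem.Str.toList_lower] using this

theorem pv_hit_nil (s : List Char) : pvHit (pvBuckets []) s = false := by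
  rw [Bool.eq_false_iff]
  intro h
  rcases (pv_hit_iff [] s).mp h with ⟨tl, hm, _⟩
  simp at hm

-- the two fold steps insert the same entry for every region
theorem pv_step_eq (cbr : List (String × List String))
    (out : PySem.Dict String (List String)) (ra : String × List String) :
    (let completed_terms := (((PySem.Dict.mk cbr).get? ra.1).getD []).map PySem.Str.lower
     if completed_terms.isEmpty || ra.2.isEmpty then out.insert ra.1 ra.2
     else out.insert ra.1 (ra.2.filter (fun a =>
       ! completed_terms.any (fun t => !(t == "") && PySem.Str.isIn t (PySem.Str.lower a)))))
    = (let buckets := pvBuckets (((PySem.Dict.mk cbr).get? ra.1).getD [])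
       out.insert ra.1 (ra.2.filter (fun a => ! pvHit buckets (PySem.Chars.lower a.toList)))) := by
  set ts := ((PySem.Dict.mk cbr).get? ra.1).getD [] with hts
  dsimp only
  by_cases hct : (ts.map PySem.Str.lower).isEmpty = true
  · have hts0 : ts = [] := by simpa using hct
    rw [if_pos (by simp [hct])]
    congr 1
    rw [hts0]
    exact (List.filter_eq_self.mpr (fun a _ => by simp [pv_hit_nil])).symm
  · by_cases has : ra.2.isEmpty = true
    · have : ra.2 = [] := by simpa using has
      rw [if_pos (by simp [has]), this, List.filter_nil]
    · rw [if_neg (by simp [hct, has])]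
      congr 1
      exact List.filter_congr (fun a _ => (pv_pred_eq ts a).symm)

-- ===== VERDICT =====
theorem filter_completed_actions_spec : Claim_equal_filter_completed_actions := by
  intro abr cbr _
  unfold Spec_filter_completed_actions filter_completed_actions filter_completed_actions_alt
  by_cases h : cbr.isEmpty = true
  · rw [if_pos h, if_pos h]
  · rw [if_neg h, if_neg h]
    have hf : (fun (out : PySem.Dict String (List String)) (ra : String × List String) =>
        let completed_terms := (((PySem.Dict.mk cbr).get? ra.1).getD []).map PySem.Str.lower
        if completed_terms.isEmpty || ra.2.isEmpty then out.insert ra.1 ra.2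
        else out.insert ra.1 (ra.2.filter (fun a =>
          ! completed_terms.any (fun t => !(t == "") && PySem.Str.isIn t (PySem.Str.lower a)))))
      = (fun (out : PySem.Dict String (List String)) (ra : String × List String) =>
          let buckets := pvBuckets (((PySem.Dict.mk cbr).get? ra.1).getD [])
          out.insert ra.1 (ra.2.filter (fun a => ! pvHit buckets (PySem.Chars.lower a.toList)))) :=
      funext fun out => funext fun ra => pv_step_eq cbr out ra
    rw [hf]
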